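-- pv_equiv track=rewrite | github.com/STMicroelectronics/stm32ai-modelzoo | image_classification/src/models/st_efficientnet_lc_v1.py | round_expansion
-- ===== SOURCE A (Python) =====
-- from typing import List, Tuple
--
-- def round_expansion(expansion_factor: int, repeats: List[int]) -> List[int] :
--     exp_ratio = []
--     flag = 1
--     for r in repeats:
--         if (r != 0) and flag:
--             exp_ratio.append(1)
--             flag = 0
--         else:
--             exp_ratio.append(expansion_factor)
--
--     return exp_ratio
-- ===== SOURCE B (Python) =====
-- from typing import List
--
-- def round_expansion(expansion_factor: int, repeats: List[int]) -> List[int]: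
--     idx = next((i for i, r in enumerate(repeats) if r != 0), None)
--     if idx is None:
--         return [expansion_factor] * len(repeats)
--     return [expansion_factor] * idx + [1] + [expansion_factor] * (len(repeats) - idx - 1)
-- ===== Notes on version B (the rewrite author's own statement) =====
-- stated objective: simpler
-- what changed: Replaces the flag-threaded accumulator loop with a locate-then-build decomposition: find the first nonzero index once, then assemble the list from replicated segments with a single 1 at that index.
import Mathlib
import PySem

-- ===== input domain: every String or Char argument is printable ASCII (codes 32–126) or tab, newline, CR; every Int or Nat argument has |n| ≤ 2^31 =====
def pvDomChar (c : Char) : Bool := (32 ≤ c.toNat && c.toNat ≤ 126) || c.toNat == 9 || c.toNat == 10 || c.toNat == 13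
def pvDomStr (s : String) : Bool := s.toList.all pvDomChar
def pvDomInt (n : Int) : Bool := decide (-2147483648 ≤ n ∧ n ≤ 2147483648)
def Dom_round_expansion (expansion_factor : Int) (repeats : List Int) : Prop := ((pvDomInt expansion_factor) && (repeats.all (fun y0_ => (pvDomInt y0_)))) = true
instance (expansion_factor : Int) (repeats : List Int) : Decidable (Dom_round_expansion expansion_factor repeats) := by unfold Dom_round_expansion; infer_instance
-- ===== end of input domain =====

-- B replaces A's flag-threaded loop by a locate-then-build decomposition (objective: simpler).

-- ===== PORT A =====
-- A's loop: accumulate into exp_ratio, threading the flag through each step.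
def roundExpansionLoopA (expansion_factor : Int) : List Int → Bool → List Int → List Int
  | [], _, acc => acc
  | r :: rs, flag, acc =>
    if r ≠ 0 ∧ flag then
      roundExpansionLoopA expansion_factor rs false (acc ++ [1])
    else
      roundExpansionLoopA expansion_factor rs flag (acc ++ [expansion_factor])

def round_expansion (expansion_factor : Int) (repeats : List Int) : List Int :=
  roundExpansionLoopA expansion_factor repeats true []

-- ===== PORT B =====
def round_expansion_alt (expansion_factor : Int) (repeats : List Int) : List Int :=
  match repeats.findIdx? (fun r => !(r == 0)) with
  | none => List.replicate repeats.length expansion_factor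
  | some i => List.replicate i expansion_factor ++ [1]
      ++ List.replicate (repeats.length - i - 1) expansion_factor

-- ===== PRECONDITION & SPEC =====
def Spec_round_expansion (expansion_factor : Int) (repeats : List Int) (out : List Int) : Prop := out = round_expansion_alt expansion_factor repeats
instance (expansion_factor : Int) (repeats : List Int) (out : List Int) : Decidable (Spec_round_expansion expansion_factor repeats out) := by unfold Spec_round_expansion; infer_instance

-- ===== CLAIM (what is proved, stated in full; the proofs are below) =====
def Claim_equal_round_expansion : Prop := ∀ (expansion_factor : Int) (repeats : List Int), Dom_round_expansion expansion_factor repeats → Spec_round_expansion expansion_factor repeats (round_expansion expansion_factor repeats)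

-- ===== LEMMAS AND PROOFS =====
theorem loopA_acc (ef : Int) (rs : List Int) (flag : Bool) (acc : List Int) :
    roundExpansionLoopA ef rs flag acc = acc ++ roundExpansionLoopA ef rs flag [] := by
  induction rs generalizing flag acc with
  | nil => simp [roundExpansionLoopA]
  | cons r rs ih =>
    simp only [roundExpansionLoopA]
    split <;> (rw [ih]; conv_rhs => rw [ih]) <;> simp

theorem loopA_false (ef : Int) (rs : List Int) :
    roundExpansionLoopA ef rs false [] = List.replicate rs.length ef := by
  induction rs with
  | nil => simp [roundExpansionLoopA]
  | cons r rs ih =>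
    have : roundExpansionLoopA ef (r :: rs) false [] = roundExpansionLoopA ef rs false [ef] := by
      simp [roundExpansionLoopA]
    rw [this, loopA_acc, ih, List.length_cons, List.replicate_succ]
    simp

theorem alt_cons_zero (ef : Int) (rs : List Int) :
    round_expansion_alt ef ((0 : Int) :: rs) = ef :: round_expansion_alt ef rs := by
  unfold round_expansion_alt
  rw [List.findIdx?_cons]
  cases h : List.findIdx? (fun r : Int => !(r == 0)) rs with
  | none => simp [List.replicate_succ]
  | some i =>
    have e : rs.length + 1 - (i + 1) - 1 = rs.length - i - 1 := by omega
    simp [List.replicate_succ]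

theorem round_expansion_eq (ef : Int) (rs : List Int) :
    round_expansion ef rs = round_expansion_alt ef rs := by
  induction rs with
  | nil =>
    simp [round_expansion, round_expansion_alt, roundExpansionLoopA, List.findIdx?_nil]
  | cons r rs ih =>
    by_cases hr : r = 0
    · subst hr
      have hA : round_expansion ef ((0 : Int) :: rs) = ef :: round_expansion ef rs := by
        simp only [round_expansion, roundExpansionLoopA]
        rw [if_neg (by simp), loopA_acc]
        simp
      rw [hA, ih, alt_cons_zero]
    · have hA : round_expansion ef (r :: rs) = 1 :: List.replicate rs.length ef := by
        simp only [round_expansion, roundExpansionLoopA]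
        split
        · rw [loopA_acc, loopA_false]; simp
        · next hc => exact absurd ⟨hr, trivial⟩ hc
      rw [hA]
      unfold round_expansion_alt
      rw [List.findIdx?_cons, if_pos (by simp [hr])]
      simp

-- ===== VERDICT (by name: the statement is the Claim_ definition above) =====
theorem round_expansion_spec : Claim_equal_round_expansion := by
  intro ef rs _
  exact round_expansion_eq ef rs
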